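-- pv_equiv track=rewrite | github.com/manishshettym/codescholar | codescholar/evaluation/emd/utils_emd.py | multiapi_trim_code
-- ===== SOURCE A (Python) =====
-- def multiapi_trim_code(snippet, apis):
--     lines = snippet.split("\n")
--     api_lines = []
--
--     for api in apis:
--         for i, line in enumerate(lines):
--             if api in line:
--                 api_lines.append(i)
--                 break
--
--     if api_lines == []:
--         return snippet
--
--     start_line = max(0, min(api_lines) - 2)
--     end_line = min(len(lines), max(api_lines) + 3)
--     return "\n".join(lines[start_line:end_line])
-- ===== SOURCE B (Python) =====
-- def multiapi_trim_code(snippet, apis):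
--     lines = snippet.split("\n")
--     remaining = set(apis)
--     first = None
--     last = None
--     for i, line in enumerate(lines):
--         if not remaining:
--             break
--         still = {a for a in remaining if a not in line}
--         if len(still) != len(remaining):
--             if first is None:
--                 first = i
--             last = i
--             remaining = still
--     if first is None:
--         return snippet
--     return "\n".join(lines[max(0, first - 2): last + 3])
-- ===== Notes on version B (the rewrite author's own statement) =====
-- stated objective: alternative
-- what changed: Single pass over the lines maintaining a shrinking set of not-yet-found APIs with an early break, tracking first/last hit indices directly, instead of one full scan of the lines per API followed by min/max over the collected indices.
import Mathlib
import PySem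

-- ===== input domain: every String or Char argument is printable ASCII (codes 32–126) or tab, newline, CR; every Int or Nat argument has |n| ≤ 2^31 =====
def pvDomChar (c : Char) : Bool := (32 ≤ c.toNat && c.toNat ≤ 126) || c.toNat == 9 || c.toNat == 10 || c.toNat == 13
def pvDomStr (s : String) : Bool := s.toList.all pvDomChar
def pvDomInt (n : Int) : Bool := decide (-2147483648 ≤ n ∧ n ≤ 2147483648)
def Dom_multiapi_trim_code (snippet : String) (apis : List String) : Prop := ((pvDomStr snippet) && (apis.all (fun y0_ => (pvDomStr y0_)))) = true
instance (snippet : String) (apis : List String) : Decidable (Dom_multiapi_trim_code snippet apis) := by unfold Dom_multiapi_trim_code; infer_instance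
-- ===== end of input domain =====

-- B replaces A's per-API full scan of the lines by a single pass over the lines with a
-- shrinking set of not-yet-found APIs (early break), tracking first/last hit indices directly.


-- ===== PORT A =====
-- inner loop of A: `for i, line in enumerate(lines): if api in line: append i; break`
def aFirstHit (api : String) : List (Int × String) → Option Int
  | [] => none
  | (i, line) :: rest => if PySem.Str.isIn api line then some i else aFirstHit api rest

def multiapi_trim_code (snippet : String) (apis : List String) : String :=
  let lines := (PySem.Str.split? snippet "\n").getD []   -- sep = "\n" ≠ "", split? is always `some` here
  let api_lines := apis.foldl (fun acc api =>
    match aFirstHit api (PySem.List.enumerate lines 0) with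
    | some i => acc ++ [i]
    | none => acc) []
  if api_lines = [] then snippet
  else
    let start_line := max 0 ((PySem.List.min? api_lines (fun x => x)).getD 0 - 2)
    let end_line := min ((lines.length : Int)) ((PySem.List.max? api_lines (fun x => x)).getD 0 + 3)
    PySem.Str.join "\n" (PySem.List.slice lines (some start_line) (some end_line))

-- ===== PORT B =====
-- B's loop: one pass over the enumerated lines with the remaining-API set and first/last accumulators
def bLoop : List (Int × String) → PySem.Set String → Option Int → Option Int → Option Int × Option Int
  | [], _, first, last => (first, last)
  | (i, line) :: rest, remaining, first, last =>
    if remaining = [] then (first, last)    -- `if not remaining: break`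
    else
      let still := remaining.filter (fun a => !(PySem.Str.isIn a line))
      if still.length ≠ remaining.length then
        bLoop rest still (match first with | none => some i | some f => some f) (some i)
      else
        bLoop rest remaining first last

def multiapi_trim_code_alt (snippet : String) (apis : List String) : String :=
  let lines := (PySem.Str.split? snippet "\n").getD []   -- sep = "\n" ≠ "", split? is always `some` here
  match bLoop (PySem.List.enumerate lines 0) (PySem.Set.ofList apis) none none with
  | (some first, some last) =>
      PySem.Str.join "\n" (PySem.List.slice lines (some (max 0 (first - 2))) (some (last + 3)))
  | _ => snippet

-- ===== PRECONDITION & SPEC =====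
def Spec_multiapi_trim_code (snippet : String) (apis : List String) (out : String) : Prop := out = multiapi_trim_code_alt snippet apis
instance (snippet : String) (apis : List String) (out : String) : Decidable (Spec_multiapi_trim_code snippet apis out) := by unfold Spec_multiapi_trim_code; infer_instance

-- ===== CLAIM (what is proved, stated in full; the proofs are below) =====
def Claim_equal_multiapi_trim_code : Prop := ∀ (snippet : String) (apis : List String), Dom_multiapi_trim_code snippet apis → Spec_multiapi_trim_code snippet apis (multiapi_trim_code snippet apis)

-- ===== LEMMAS AND PROOFS =====

theorem foldl_min_mem (x : Int) (t : List Int) : t.foldl min x ∈ x :: t := by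
  induction t generalizing x with
  | nil => simp
  | cons y t ih =>
    simp only [List.foldl_cons]
    rcases (List.mem_cons.mp (ih (min x y))) with h | h
    · rcases min_choice x y with hc | hc <;> rw [h, hc] <;> simp
    · simp [List.mem_cons, h]

theorem foldl_min_le (x : Int) (t : List Int) : ∀ y ∈ x :: t, t.foldl min x ≤ y := by
  induction t generalizing x with
  | nil => simp
  | cons z t ih =>
    intro y hy
    simp only [List.foldl_cons]
    have hm : t.foldl min (min x z) ≤ min x z := ih (min x z) (min x z) (by simp)
    rcases List.mem_cons.mp hy with rfl | hy'
    · exact le_trans hm (min_le_left _ _)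
    rcases List.mem_cons.mp hy' with rfl | hy''
    · exact le_trans hm (min_le_right _ _)
    · exact ih (min x z) y (by simp [hy''])

theorem foldl_max_mem (x : Int) (t : List Int) : t.foldl max x ∈ x :: t := by
  induction t generalizing x with
  | nil => simp
  | cons y t ih =>
    simp only [List.foldl_cons]
    rcases (List.mem_cons.mp (ih (max x y))) with h | h
    · rcases max_choice x y with hc | hc <;> rw [h, hc] <;> simp
    · simp [List.mem_cons, h]

theorem foldl_le_max (x : Int) (t : List Int) : ∀ y ∈ x :: t, y ≤ t.foldl max x := by
  induction t generalizing x with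
  | nil => simp
  | cons z t ih =>
    intro y hy
    simp only [List.foldl_cons]
    have hm : max x z ≤ t.foldl max (max x z) := ih (max x z) (max x z) (by simp)
    rcases List.mem_cons.mp hy with rfl | hy'
    · exact le_trans (le_max_left _ _) hm
    rcases List.mem_cons.mp hy' with rfl | hy''
    · exact le_trans (le_max_right _ _) hm
    · exact ih (max x z) y (by simp [hy''])

theorem pymin_eq_some (xs : List Int) (m : Int) (h1 : m ∈ xs) (h2 : ∀ x ∈ xs, m ≤ x) :
    PySem.List.min? xs (fun y => y) = some m := by
  cases xs with
  | nil => simp at h1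
  | cons x t =>
    rw [PySem.List.min?_id_cons]
    exact congrArg some (le_antisymm (foldl_min_le x t m h1) (h2 _ (foldl_min_mem x t)))

theorem pymax_eq_some (xs : List Int) (m : Int) (h1 : m ∈ xs) (h2 : ∀ x ∈ xs, x ≤ m) :
    PySem.List.max? xs (fun y => y) = some m := by
  cases xs with
  | nil => simp at h1
  | cons x t =>
    rw [PySem.List.max?_id_cons]
    exact congrArg some (le_antisymm (h2 _ (foldl_max_mem x t)) (foldl_le_max x t m h1))

-- A's accumulator loop is a filterMap
theorem afold_eq_filterMap (E : List (Int × String)) (apis : List String) (acc : List Int) :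
    apis.foldl (fun acc api =>
      match aFirstHit api E with
      | some i => acc ++ [i]
      | none => acc) acc = acc ++ apis.filterMap (fun api => aFirstHit api E) := by
  induction apis generalizing acc with
  | nil => simp
  | cons a t ih =>
    simp only [List.foldl_cons, List.filterMap_cons]
    cases h : aFirstHit a E <;> simp [ih]

-- the hit value of `aFirstHit` on a cons
theorem aFirstHit_cons (api : String) (i : Int) (line : String) (rest : List (Int × String)) :
    aFirstHit api ((i, line) :: rest) =
      if PySem.Str.isIn api line then some i else aFirstHit api rest := rfl

theorem aFirstHit_mem_fst (api : String) (E : List (Int × String)) (j : Int)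
    (h : aFirstHit api E = some j) : j ∈ E.map Prod.fst := by
  induction E with
  | nil => simp [aFirstHit] at h
  | cons p rest ih =>
    obtain ⟨i, line⟩ := p
    rw [aFirstHit_cons] at h
    split at h
    · simp at h; simp [h]
    · simpa using Or.inr (by simpa using ih h)

-- hit detection in B: the filter shrinks iff some remaining API occurs in the line
theorem still_length_ne_iff (R : List String) (line : String) :
    (R.filter (fun a => !(PySem.Str.isIn a line))).length ≠ R.length ↔
      ∃ a ∈ R, PySem.Str.isIn a line = true := by
  constructor
  · intro h
    by_contra hno
    push Not at hno
    have : R.filter (fun a => !(PySem.Str.isIn a line)) = R :=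
      List.filter_eq_self.mpr (fun a ha => by rw [eq_false_of_ne_true (hno a ha)]; rfl)
    exact h (by rw [this])
  · intro ⟨a, ha, hin⟩ h
    have := List.length_filter_eq_length_iff.mp h a ha
    rw [hin] at this
    exact absurd this (by decide)

-- The main invariant for B's loop.
theorem bLoop_spec (E : List (Int × String)) :
    (E.map Prod.fst).Pairwise (· < ·) →
    ∀ (R : List String) (first last : Option Int),
    bLoop E R first last =
      ((match first with
        | none => PySem.List.min? (R.filterMap (fun a => aFirstHit a E)) (fun y => y)
        | some f => some f),
       (match PySem.List.max? (R.filterMap (fun a => aFirstHit a E)) (fun y => y) with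
        | none => last
        | some m => some m)) := by
  induction E with
  | nil =>
    intro _ R first last
    simp [bLoop, aFirstHit, List.filterMap_eq_nil_iff.mpr (fun a _ => rfl),
      PySem.List.min?, PySem.List.max?]
    cases first <;> simp
  | cons p rest ih =>
    obtain ⟨i, line⟩ := p
    intro hpw R first last
    have hpwc : (i :: rest.map Prod.fst).Pairwise (· < ·) := hpw
    have hpw' : (rest.map Prod.fst).Pairwise (· < ·) := (List.pairwise_cons.mp hpwc).2
    have hlt : ∀ j ∈ rest.map Prod.fst, i < j := (List.pairwise_cons.mp hpwc).1
    by_cases hR : R = []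
    · subst hR
      cases first <;> rfl
    · rw [show bLoop ((i, line) :: rest) R first last =
        (if R = [] then (first, last) else
          let still := R.filter (fun a => !(PySem.Str.isIn a line))
          if still.length ≠ R.length then
            bLoop rest still (match first with | none => some i | some f => some f) (some i)
          else bLoop rest R first last) from rfl]
      simp only [if_neg hR]
      set still := R.filter (fun a => !(PySem.Str.isIn a line)) with hstill
      have hM : R.filterMap (fun a => aFirstHit a ((i, line) :: rest)) =
          R.filterMap (fun a => if PySem.Str.isIn a line then some i else aFirstHit a rest) := by
        apply List.filterMap_congr; intro a _; rfl
      by_cases hhit : still.length ≠ R.length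
      · -- some API matched this line
        obtain ⟨a0, ha0, hin0⟩ := (still_length_ne_iff R line).mp hhit
        simp only [if_pos hhit]
        rw [ih hpw' still _ (some i)]
        -- characterize min and max of M := R.filterMap (aFirstHit on cons)
        have hmemM : i ∈ R.filterMap (fun a => aFirstHit a ((i, line) :: rest)) := by
          rw [hM]
          exact List.mem_filterMap.mpr ⟨a0, ha0, by rw [if_pos hin0]⟩
        have hMrest : ∀ j ∈ still.filterMap (fun a => aFirstHit a rest), i < j := by
          intro j hj
          obtain ⟨a, _, hfa⟩ := List.mem_filterMap.mp hj
          exact hlt j (aFirstHit_mem_fst a rest j hfa)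
        have hboundM : ∀ j ∈ R.filterMap (fun a => aFirstHit a ((i, line) :: rest)), i ≤ j := by
          intro j hj
          rw [hM] at hj
          obtain ⟨a, haR, hfa⟩ := List.mem_filterMap.mp hj
          by_cases hal : PySem.Str.isIn a line = true
          · rw [if_pos hal] at hfa
            have := Option.some.inj hfa
            omega
          · rw [if_neg hal] at hfa
            exact le_of_lt (hlt j (aFirstHit_mem_fst a rest j hfa))
        have hminM : PySem.List.min? (R.filterMap (fun a => aFirstHit a ((i, line) :: rest)))
            (fun y => y) = some i := pymin_eq_some _ i hmemM hboundM
        -- the unmatched contributions through the cons equal those through rest on `still`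
        have hMsplit : ∀ j, j ∈ still.filterMap (fun a => aFirstHit a rest) ∨ j = i ↔
            j ∈ R.filterMap (fun a => aFirstHit a ((i, line) :: rest)) := by
          intro j
          rw [hM]
          constructor
          · rintro (hj | rfl)
            · obtain ⟨a, haS, hfa⟩ := List.mem_filterMap.mp hj
              rw [hstill, List.mem_filter] at haS
              exact List.mem_filterMap.mpr ⟨a, haS.1,
                by rw [if_neg (fun hcc => absurd (hcc ▸ haS.2) (by decide))]; exact hfa⟩
            · exact List.mem_filterMap.mpr ⟨a0, ha0, by rw [if_pos hin0]⟩
          · intro hj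
            obtain ⟨a, haR, hfa⟩ := List.mem_filterMap.mp hj
            by_cases hal : PySem.Str.isIn a line = true
            · rw [if_pos hal] at hfa
              exact Or.inr (Option.some.inj hfa).symm
            · rw [if_neg hal] at hfa
              exact Or.inl (List.mem_filterMap.mpr
                ⟨a, by
                  rw [hstill]
                  exact List.mem_filter.mpr ⟨haR, by rw [eq_false_of_ne_true hal]; rfl⟩, hfa⟩)
        have hmaxM : PySem.List.max? (R.filterMap (fun a => aFirstHit a ((i, line) :: rest)))
            (fun y => y) =
            (match PySem.List.max? (still.filterMap (fun a => aFirstHit a rest)) (fun y => y) with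
              | none => some i | some m => some m) := by
          cases hmr : PySem.List.max? (still.filterMap (fun a => aFirstHit a rest)) (fun y => y) with
          | none =>
            have hSempty := (PySem.List.max?_eq_none_iff _ _).mp hmr
            apply pymax_eq_some _ i hmemM
            intro j hj
            rcases (hMsplit j).mpr hj with hjs | rfl
            · rw [hSempty] at hjs; simp at hjs
            · exact le_refl _
          | some m =>
            have hmmem := PySem.List.max?_mem hmr
            have hmmax := PySem.List.max?_isMax hmr
            apply pymax_eq_some _ m ((hMsplit m).mp (Or.inl hmmem))
            intro j hj
            rcases (hMsplit j).mpr hj with hjs | rfl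
            · exact hmmax j hjs
            · exact le_of_lt (hMrest m hmmem)
        rw [hminM, hmaxM]
        cases hms : PySem.List.max? (List.filterMap (fun a => aFirstHit a rest) still)
          (fun y => y) <;> cases first <;> rfl
      · -- no API matched this line: still = R
        have hall : ∀ a ∈ R, PySem.Str.isIn a line = false := by
          intro a ha
          by_contra hc
          exact hhit ((still_length_ne_iff R line).mpr ⟨a, ha, by simpa using hc⟩)
        have hSR : R.filterMap (fun a => aFirstHit a ((i, line) :: rest)) =
            R.filterMap (fun a => aFirstHit a rest) := by
          rw [hM]; apply List.filterMap_congr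
          intro a ha
          rw [if_neg (fun hcc => Bool.false_ne_true ((hall a ha).symm.trans hcc))]
        simp only [if_neg hhit]
        rw [ih hpw' R first last, hSR]

-- the indices produced by aFirstHit over `enumerate lines 0` are nonnegative
theorem aFirstHit_nonneg (lines : List String) (api : String) (j : Int)
    (h : aFirstHit api (PySem.List.enumerate lines 0) = some j) : 0 ≤ j := by
  have := aFirstHit_mem_fst api _ j h
  simp only [List.mem_map] at this
  obtain ⟨p, hp, rfl⟩ := this
  rw [PySem.List.mem_enumerate_iff] at hp
  obtain ⟨k, hk, rfl⟩ := hp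
  simp

-- a slice whose upper bound is clamped to the length is the same slice
theorem slice_min_len (lines : List String) (s e : Int) (hs : 0 ≤ s) (he : 0 ≤ e) :
    PySem.List.slice lines (some s) (some (min (lines.length : Int) e)) =
      PySem.List.slice lines (some s) (some e) := by
  rw [PySem.List.slice_toNat lines hs (by omega), PySem.List.slice_toNat lines hs he]
  apply List.take_eq_take_iff.mpr
  simp [List.length_drop]
  omega

-- ===== VERDICT (by name: the statement is the Claim_ definition above) =====
theorem multiapi_trim_code_spec : Claim_equal_multiapi_trim_code := by
  intro snippet apis _
  unfold Spec_multiapi_trim_code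
  simp only [multiapi_trim_code, multiapi_trim_code_alt]
  set lines := (PySem.Str.split? snippet "\n").getD [] with hlines
  set E := PySem.List.enumerate lines 0 with hE
  have hbl := bLoop_spec E
    (by rw [hE]; exact List.pairwise_map.mpr (PySem.List.pairwise_lt_enumerate lines 0))
    (PySem.Set.ofList apis) none none
  rw [afold_eq_filterMap]
  simp only [List.nil_append]
  set MB := (PySem.Set.ofList apis : List String).filterMap (fun a => aFirstHit a E) with hMB
  set MA := apis.filterMap (fun a => aFirstHit a E) with hMA
  have hmemiff : ∀ j, j ∈ MA ↔ j ∈ MB := by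
    intro j
    rw [hMA, hMB]
    constructor <;> intro hj <;> obtain ⟨a, ha, hfa⟩ := List.mem_filterMap.mp hj
    · exact List.mem_filterMap.mpr ⟨a, (PySem.Set.mem_ofList apis a).mpr ha, hfa⟩
    · exact List.mem_filterMap.mpr ⟨a, (PySem.Set.mem_ofList apis a).mp ha, hfa⟩
  clear_value MA MB
  by_cases hMAe : MA = []
  · have hMBe : MB = [] := by
      cases hMBc : MB with
      | nil => rfl
      | cons x t =>
        exfalso
        have : x ∈ MA := (hmemiff x).mpr (by simp [hMBc])
        rw [hMAe] at this; simp at this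
    subst hMAe; subst hMBe
    rw [hbl]
    rw [if_pos rfl]
    rfl
  · -- both nonempty: min/max agree
    obtain ⟨x, t, rfl⟩ : ∃ x t, MA = x :: t := by
      cases MA with
      | nil => exact absurd rfl hMAe
      | cons x t => exact ⟨x, t, rfl⟩
    have hminA : PySem.List.min? (x :: t) (fun y => y) = some (t.foldl min x) :=
      PySem.List.min?_id_cons x t
    have hmaxA : PySem.List.max? (x :: t) (fun y => y) = some (t.foldl max x) :=
      PySem.List.max?_id_cons x t
    set mn := t.foldl min x with hmn
    set mx := t.foldl max x with hmx
    have hminB : PySem.List.min? MB (fun y => y) = some mn :=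
      pymin_eq_some _ mn ((hmemiff mn).mp (foldl_min_mem x t))
        (fun j hj => foldl_min_le x t j ((hmemiff j).mpr hj))
    have hmaxB : PySem.List.max? MB (fun y => y) = some mx :=
      pymax_eq_some _ mx ((hmemiff mx).mp (foldl_max_mem x t))
        (fun j hj => foldl_le_max x t j ((hmemiff j).mpr hj))
    rw [hbl, hminB, hmaxB]
    rw [if_neg hMAe]
    simp only [hminA, hmaxA, Option.getD_some]
    -- nonnegativity of the indices
    have hmn0 : 0 ≤ mn := by
      have hmem : mn ∈ x :: t := foldl_min_mem x t
      rw [hMA] at hmem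
      obtain ⟨a, _, hfa⟩ := List.mem_filterMap.mp hmem
      exact aFirstHit_nonneg lines a mn (hE ▸ hfa)
    have hmx0 : 0 ≤ mx := by
      have hmem : mx ∈ x :: t := foldl_max_mem x t
      rw [hMA] at hmem
      obtain ⟨a, _, hfa⟩ := List.mem_filterMap.mp hmem
      exact aFirstHit_nonneg lines a mx (hE ▸ hfa)
    rw [slice_min_len lines (max 0 (mn - 2)) (mx + 3) (by omega) (by omega)]
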